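-- pv_equiv track=rewrite | github.com/miiiingyuuu/Algorithm | 백준/Gold/27211. 도넛 행성/도넛 행성.py | bfs
-- ===== SOURCE A (Python) =====
-- from collections import deque
--
-- def bfs(N, M, grid):
--     visited = [[0] * M for _ in range(N)]
--     dx = [-1, 1, 0, 0]
--     dy = [0, 0, -1, 1]
--     ans = 0
--
--     for i in range(N):
--         for j in range(M):
--             if not visited[i][j] and grid[i][j] == 0:
--                 q = deque([(i, j)])
--                 visited[i][j] = 1
--                 ans += 1
--
--                 while q:
--                     x, y = q.popleft()
--
--                     for k in range(4):
--                         nx = (x + dx[k]) % N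
--                         ny = (y + dy[k]) % M
--
--                         if not visited[nx][ny] and grid[nx][ny] == 0:
--                             visited[nx][ny] = 1
--                             q.append((nx, ny))
--
--     return ans
-- ===== SOURCE B (Python) =====
-- def bfs(N, M, grid):
--     # Union-find over flattened cells: union each zero cell with its right and
--     # down toroidal neighbors (covers all four adjacencies by symmetry), then
--     # count zero cells that are their own root.
--     n = max(N, 0) * max(M, 0)
--     parent = list(range(n))
--
--     def find(x):
--         while parent[x] != x:
--             x = parent[x]
--         return x
--
--     for i in range(N):
--         for j in range(M):
--             if grid[i][j] == 0:
--                 for ni, nj in ((i, (j + 1) % M), ((i + 1) % N, j)):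
--                     if grid[ni][nj] == 0:
--                         a = find(i * M + j)
--                         b = find(ni * M + nj)
--                         if a != b:
--                             if a < b:
--                                 a, b = b, a
--                             parent[a] = b
--     return sum(1 for i in range(N) for j in range(M)
--                if grid[i][j] == 0 and find(i * M + j) == i * M + j)
-- ===== Notes on version B (the rewrite author's own statement) =====
-- stated objective: alternative
-- what changed: Replaces BFS flood fill (deque + visited matrix) by a disjoint-set union over flattened cells: every zero cell is unioned with its right and down toroidal neighbors and the answer is the number of zero cells that are their own root.
import Mathlib
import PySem

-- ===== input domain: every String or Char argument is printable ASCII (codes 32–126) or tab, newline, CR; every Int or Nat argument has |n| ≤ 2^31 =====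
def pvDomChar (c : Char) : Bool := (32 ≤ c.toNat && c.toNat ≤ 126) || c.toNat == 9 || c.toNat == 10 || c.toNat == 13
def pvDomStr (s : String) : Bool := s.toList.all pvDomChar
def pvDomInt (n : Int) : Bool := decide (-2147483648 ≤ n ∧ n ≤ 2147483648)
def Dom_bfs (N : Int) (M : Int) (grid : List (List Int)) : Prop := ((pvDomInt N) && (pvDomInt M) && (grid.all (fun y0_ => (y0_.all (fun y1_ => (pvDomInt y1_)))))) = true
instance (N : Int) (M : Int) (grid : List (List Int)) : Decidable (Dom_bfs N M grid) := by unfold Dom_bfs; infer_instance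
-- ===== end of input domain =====

-- B replaces A's BFS flood fill (deque + visited matrix) by a disjoint-set union over
-- flattened cells (right/down toroidal edges, roots counted); return value only,
-- neither implementation mutates its arguments.

-- ===== PORT A =====
-- shared Python indexing semantics g[i][j] (both sources read the grid this way;
-- in-range under Pre_, so the defaults are never reached on admitted inputs)
def idx2 (g : List (List Int)) (i j : Int) : Int :=
  PySem.List.pyGetD (PySem.List.pyGetD g i []) j 0

-- visited[i][j] = 1
def vset (v : List (List Int)) (i j : Int) : List (List Int) :=
  PySem.List.pySetD v i (PySem.List.pySetD (PySem.List.pyGetD v i []) j 1)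

-- body of A's 'for k in range(4)' loop
def stepA (N M : Int) (grid : List (List Int)) (x y : Int)
    (s : List (List Int) × List (Int × Int)) (k : Int) : List (List Int) × List (Int × Int) :=
  let nx := PySem.Int.mod (x + PySem.List.pyGetD [-1, 1, 0, 0] k 0) N
  let ny := PySem.Int.mod (y + PySem.List.pyGetD [0, 0, -1, 1] k 0) M
  if idx2 s.1 nx ny = 0 ∧ idx2 grid nx ny = 0 then
    (vset s.1 nx ny, s.2 ++ [(nx, ny)])
  else s

-- A's 'while q' loop (q.popleft(); fuel bounds the iteration count, proved sufficient)
def loopA (N M : Int) (grid : List (List Int)) :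
    Nat → List (List Int) → List (Int × Int) → List (List Int)
  | _, v, [] => v
  | 0, v, _ :: _ => v
  | fuel + 1, v, (x, y) :: q =>
      let s := (PySem.List.pyRange 0 4 1).foldl (stepA N M grid x y) (v, q)
      loopA N M grid fuel s.1 s.2

def bfs (N : Int) (M : Int) (grid : List (List Int)) : Int :=
  ((PySem.List.pyRange 0 N 1).foldl (fun (s : List (List Int) × Int) i =>
      (PySem.List.pyRange 0 M 1).foldl (fun (s : List (List Int) × Int) j =>
        if idx2 s.1 i j = 0 ∧ idx2 grid i j = 0 then
          (loopA N M grid (N.toNat * M.toNat) (vset s.1 i j) [(i, j)], s.2 + 1)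
        else s) s)
    (List.replicate N.toNat (List.replicate M.toNat 0), 0)).2

-- ===== PORT B =====
-- B's find(x): 'while parent[x] != x: x = parent[x]' (fuel bounds the iteration
-- count; fuel = len(parent) is proved sufficient under the parent invariant)
def findP (parent : List Int) : Nat → Int → Int
  | 0, x => x
  | fuel + 1, x =>
      let px := PySem.List.pyGetD parent x 0
      if px = x then x else findP parent fuel px

-- B's union body: a, b = find(u), find(v); if a != b: if a < b: a, b = b, a; parent[a] = b
def unionE (par : List Int) (u v : Int) : List Int :=
  let a := findP par par.length u
  let b := findP par par.length v
  if a ≠ b then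
    (if a < b then PySem.List.pySetD par b a else PySem.List.pySetD par a b)
  else par

-- B's per-cell body: union with right and down toroidal neighbors when both are 0
def cellStep (N M : Int) (grid : List (List Int)) (par : List Int) (c : Int × Int) : List Int :=
  if idx2 grid c.1 c.2 = 0 then
    [(c.1, PySem.Int.mod (c.2 + 1) M), (PySem.Int.mod (c.1 + 1) N, c.2)].foldl
      (fun par d =>
        if idx2 grid d.1 d.2 = 0 then unionE par (c.1 * M + c.2) (d.1 * M + d.2) else par)
      par
  else par

def bfs_alt (N : Int) (M : Int) (grid : List (List Int)) : Int :=
  let parent0 := PySem.List.pyRange 0 (max N 0 * max M 0) 1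
  let pF := (PySem.List.pyRange 0 N 1).foldl (fun par i =>
      (PySem.List.pyRange 0 M 1).foldl (fun par j => cellStep N M grid par (i, j)) par) parent0
  (PySem.List.pyRange 0 N 1).foldl (fun (acc : Int) i =>
      (PySem.List.pyRange 0 M 1).foldl (fun (acc : Int) j =>
        if idx2 grid i j = 0 ∧ findP pF pF.length (i * M + j) = i * M + j then acc + 1 else acc)
        acc) 0

-- ===== PRECONDITION & SPEC =====
-- Pre_ = exactly the inputs on which Python A returns: whenever both loops run (N > 0 and
-- M > 0), every cell grid[i][j] with i < N, j < M is read, so the first N rows must exist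
-- and have length ≥ M (otherwise Python raises IndexError).
def Pre_bfs (N : Int) (M : Int) (grid : List (List Int)) : Prop :=
  M ≤ 0 ∨ N ≤ 0 ∨ (N.toNat ≤ grid.length ∧ ∀ r ∈ grid.take N.toNat, M.toNat ≤ r.length)
instance (N : Int) (M : Int) (grid : List (List Int)) : Decidable (Pre_bfs N M grid) := by
  unfold Pre_bfs; infer_instance

def pvWitness_bfs : Int × Int × List (List Int) := (2, 2, [[0, 1], [1, 0]])

def Spec_bfs (N : Int) (M : Int) (grid : List (List Int)) (out : Int) : Prop := out = bfs_alt N M grid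
instance (N : Int) (M : Int) (grid : List (List Int)) (out : Int) : Decidable (Spec_bfs N M grid out) := by unfold Spec_bfs; infer_instance

-- ===== CLAIM (what is proved, stated in full; the proofs are below) =====
def Claim_equal_bfs : Prop := ∀ (N : Int) (M : Int) (grid : List (List Int)), Dom_bfs N M grid → Pre_bfs N M grid → Spec_bfs N M grid (bfs N M grid)

-- ===== LEMMAS AND PROOFS =====

-- abstract graph on the torus
def nbrList (N M x y : Int) : List (Int × Int) :=
  [(PySem.Int.mod (x - 1) N, y), (PySem.Int.mod (x + 1) N, y),
   (x, PySem.Int.mod (y - 1) M), (x, PySem.Int.mod (y + 1) M)]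

def inR (N M : Int) (c : Int × Int) : Prop := 0 ≤ c.1 ∧ c.1 < N ∧ 0 ≤ c.2 ∧ c.2 < M
def zeroC (grid : List (List Int)) (c : Int × Int) : Prop := idx2 grid c.1 c.2 = 0
def goodC (N M : Int) (grid : List (List Int)) (c : Int × Int) : Prop :=
  inR N M c ∧ zeroC grid c
def stepTo (N M : Int) (grid : List (List Int)) (c c' : Int × Int) : Prop :=
  c' ∈ nbrList N M c.1 c.2 ∧ zeroC grid c'
def Reach (N M : Int) (grid : List (List Int)) (c c' : Int × Int) : Prop :=
  Relation.ReflTransGen (stepTo N M grid) c c'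
def Adj (N M : Int) (grid : List (List Int)) (c d : Int × Int) : Prop :=
  goodC N M grid c ∧ goodC N M grid d ∧ d ∈ nbrList N M c.1 c.2

-- worklist invariants (A side)
def Good (N M : Int) (grid : List (List Int)) (V : Set (Int × Int)) : Prop :=
  ∀ c ∈ V, inR N M c ∧ zeroC grid c
def InvF (N M : Int) (grid : List (List Int)) (V : Set (Int × Int)) (q : List (Int × Int)) : Prop :=
  q.Nodup ∧ (∀ c ∈ q, c ∈ V) ∧ Good N M grid V ∧
  (∀ c ∈ V, c ∉ q → ∀ c', stepTo N M grid c c' → c' ∈ V)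

-- matrix representation of a visited set, plus shape
def RelA (N M : Int) (v : List (List Int)) (V : Set (Int × Int)) : Prop :=
  v.length = N.toNat ∧ (∀ r ∈ v, r.length = M.toNat) ∧
  ∀ c : Int × Int, inR N M c → (idx2 v c.1 c.2 = 0 ↔ c ∉ V)

def czero (v : List (List Int)) : Nat :=
  (v.map (fun r => r.countP (fun z => z == 0))).sum

-- the common abstract scanner A's outer loop implements
noncomputable def absScan (N M : Int) (grid : List (List Int)) :
    List (Int × Int) → Set (Int × Int) → Int → Int
  | [], _, n => n
  | c :: cs, V, n =>
      @ite _ (c ∉ V ∧ zeroC grid c) (Classical.propDecidable _)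
        (absScan N M grid cs {x | x ∈ V ∨ Reach N M grid c x} (n + 1))
        (absScan N M grid cs V n)

-- A's per-neighbor update, as a function of the neighbor cell
def markA (grid : List (List Int)) (s : List (List Int) × List (Int × Int)) (c : Int × Int) :
    List (List Int) × List (Int × Int) :=
  if idx2 s.1 c.1 c.2 = 0 ∧ idx2 grid c.1 c.2 = 0 then (vset s.1 c.1 c.2, s.2 ++ [c]) else s

theorem mod_id {a N : Int} (h0 : 0 ≤ a) (h1 : a < N) : PySem.Int.mod a N = a := by
  rw [PySem.Int.mod_eq_emod_of_pos (lt_of_le_of_lt h0 h1), Int.emod_eq_of_lt h0 h1]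

theorem mod_inR {N : Int} (hN : 0 < N) (a : Int) :
    0 ≤ PySem.Int.mod a N ∧ PySem.Int.mod a N < N :=
  ⟨PySem.Int.mod_nonneg a hN, PySem.Int.mod_lt a hN⟩

theorem nbr_inR {N M : Int} (hN : 0 < N) (hM : 0 < M) {c x : Int × Int}
    (hc : inR N M c) (hx : x ∈ nbrList N M c.1 c.2) : inR N M x := by
  obtain ⟨h1, h2, h3, h4⟩ := hc
  simp only [nbrList, List.mem_cons, List.not_mem_nil, or_false] at hx
  rcases hx with h | h | h | h <;> subst h <;>
    exact ⟨by first | exact (mod_inR hN _).1 | exact h1, by first | exact (mod_inR hN _).2 | exact h2,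
           by first | exact (mod_inR hM _).1 | exact h3, by first | exact (mod_inR hM _).2 | exact h4⟩

-- the four A-neighbors are exactly the nbrList tuples on in-range cells
theorem stepA_eq_markA (N M : Int) (grid : List (List Int)) (x y : Int)
    (s : List (List Int) × List (Int × Int)) (hx : inR N M (x, y)) :
    (PySem.List.pyRange 0 4 1).foldl (stepA N M grid x y) s =
    (nbrList N M x y).foldl (markA grid) s := by
  obtain ⟨h1, h2, h3, h4⟩ := hx
  have hmx : PySem.Int.mod x N = x := mod_id h1 h2
  have hmy : PySem.Int.mod y M = y := mod_id h3 h4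
  have hr : PySem.List.pyRange 0 4 1 = [0, 1, 2, 3] := by decide
  have e : ∀ (s : List (List Int) × List (Int × Int)) (k : Int),
      stepA N M grid x y s k =
      markA grid s (PySem.Int.mod (x + PySem.List.pyGetD [-1, 1, 0, 0] k 0) N,
                    PySem.Int.mod (y + PySem.List.pyGetD [0, 0, -1, 1] k 0) M) := fun _ _ => rfl
  have g0 : PySem.List.pyGetD ([-1, 1, 0, 0] : List Int) 0 0 = -1 := by decide
  have g1 : PySem.List.pyGetD ([-1, 1, 0, 0] : List Int) 1 0 = 1 := by decide
  have g2 : PySem.List.pyGetD ([-1, 1, 0, 0] : List Int) 2 0 = 0 := by decide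
  have g3 : PySem.List.pyGetD ([-1, 1, 0, 0] : List Int) 3 0 = 0 := by decide
  have f0 : PySem.List.pyGetD ([0, 0, -1, 1] : List Int) 0 0 = 0 := by decide
  have f1 : PySem.List.pyGetD ([0, 0, -1, 1] : List Int) 1 0 = 0 := by decide
  have f2 : PySem.List.pyGetD ([0, 0, -1, 1] : List Int) 2 0 = -1 := by decide
  have f3 : PySem.List.pyGetD ([0, 0, -1, 1] : List Int) 3 0 = 1 := by decide
  rw [hr]
  simp only [List.foldl, nbrList, e, g0, g1, g2, g3, f0, f1, f2, f3, add_zero, hmx, hmy]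
  norm_num [sub_eq_add_neg]

-- ===== representation lemmas for A's matrix =====

theorem idx2_eq_getElem {v : List (List Int)} {i j : Int} (h0 : 0 ≤ i) (h1 : i.toNat < v.length)
    (h2 : 0 ≤ j) (h3 : j.toNat < (v[i.toNat]).length) :
    idx2 v i j = v[i.toNat][j.toNat] := by
  unfold idx2
  rw [PySem.List.pyGetD_eq_getElem v [] h0 (by omega),
      PySem.List.pyGetD_eq_getElem _ 0 h2 (by omega)]

theorem vset_eq_set {v : List (List Int)} {i j : Int} (h0 : 0 ≤ i) (h1 : i.toNat < v.length)
    (h2 : 0 ≤ j) :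
    vset v i j = v.set i.toNat ((v[i.toNat]).set j.toNat 1) := by
  unfold vset
  rw [PySem.List.pyGetD_eq_getElem v [] h0 (by omega),
      PySem.List.pySetD_of_nonneg _ _ h2, PySem.List.pySetD_of_nonneg _ _ h0]

theorem idx2_opt (v : List (List Int)) (i j : Int) (h0 : 0 ≤ i) (h2 : 0 ≤ j) :
    idx2 v i j = (((v[i.toNat]?).getD [])[j.toNat]?).getD 0 := by
  unfold idx2
  simp only [PySem.List.pyGetD]
  rw [PySem.List.pyGet?_of_nonneg _ h0, PySem.List.pyGet?_of_nonneg _ h2]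

theorem idx2_vset {N M : Int} {v : List (List Int)} (hlen : v.length = N.toNat)
    (hrow : ∀ r ∈ v, r.length = M.toNat) {c d : Int × Int}
    (hc : inR N M c) (hd : inR N M d) :
    idx2 (vset v c.1 c.2) d.1 d.2 = if d = c then 1 else idx2 v d.1 d.2 := by
  obtain ⟨c1, c2, c3, c4⟩ := hc; obtain ⟨d1, d2, d3, d4⟩ := hd
  have hcN : c.1.toNat < v.length := by omega
  have hdN : d.1.toNat < v.length := by omega
  have hrc : (v[c.1.toNat]).length = M.toNat := hrow _ (List.getElem_mem _)
  have hrd : (v[d.1.toNat]).length = M.toNat := hrow _ (List.getElem_mem _)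
  rw [vset_eq_set c1 hcN c3, idx2_opt _ _ _ d1 d3, idx2_opt _ _ _ d1 d3]
  rw [List.getElem?_set]
  by_cases h1 : c.1.toNat = d.1.toNat
  · rw [if_pos h1, if_pos (by omega)]
    simp only [Option.getD_some]
    rw [List.getElem?_set]
    by_cases h2 : c.2.toNat = d.2.toNat
    · have : d = c := Prod.ext (by omega) (by omega)
      rw [if_pos h2, if_pos (by omega), if_pos this]
      simp
    · have : d ≠ c := fun he => h2 (by rw [he])
      have hv : v[c.1.toNat] = v[d.1.toNat] := by simp only [h1]
      rw [if_neg h2, if_neg this, hv, List.getElem?_eq_getElem hdN]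
      simp
  · have : d ≠ c := fun he => h1 (by rw [he])
    rw [if_neg h1, if_neg this]

theorem relA_set {N M : Int} {v : List (List Int)} {V : Set (Int × Int)}
    {c : Int × Int} (hrel : RelA N M v V) (hc : inR N M c) :
    RelA N M (vset v c.1 c.2) (V ∪ {c}) := by
  obtain ⟨hlen, hrow, hiff⟩ := hrel
  obtain ⟨c1, c2, c3, c4⟩ := hc
  have hcN : c.1.toNat < v.length := by omega
  refine ⟨?_, ?_, ?_⟩
  · rw [vset_eq_set c1 hcN c3]; simpa using hlen
  · intro r hr
    rw [vset_eq_set c1 hcN c3] at hr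
    rcases List.mem_or_eq_of_mem_set hr with h | h
    · exact hrow r h
    · subst h; simpa using hrow _ (List.getElem_mem _)
  · intro d hd
    rw [idx2_vset hlen hrow ⟨c1, c2, c3, c4⟩ hd]
    by_cases hdc : d = c
    · simp [hdc]
    · rw [if_neg hdc, hiff d hd]
      simp [hdc]

theorem sum_map_set {α : Type} (f : α → Nat) :
    ∀ (l : List α) (k : Nat) (x : α) (h : k < l.length),
    ((l.set k x).map f).sum + f (l[k]'h) = (l.map f).sum + f x := by
  intro l
  induction l with
  | nil => intro k x h; simp at h
  | cons a t ih =>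
    intro k x h
    cases k with
    | zero => simp [List.set]; omega
    | succ k =>
      simp only [List.set, List.map, List.sum_cons, List.getElem_cons_succ]
      have := ih k x (by simpa using h)
      omega

theorem countP_set_one : ∀ (r : List Int) (j : Nat) (h : j < r.length), r[j]'h = 0 →
    (r.set j 1).countP (fun z => z == 0) + 1 = r.countP (fun z => z == 0) := by
  intro r
  induction r with
  | nil => intro j h; simp at h
  | cons a t ih =>
    intro j h hz
    cases j with
    | zero =>
      simp only [List.getElem_cons_zero] at hz; subst hz
      simp [List.set, List.countP_cons]
    | succ j =>
      simp only [List.set, List.countP_cons]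
      have := ih j (by simpa using h) (by simpa using hz)
      omega

theorem czero_le {N M : Int} {v : List (List Int)} (h1 : v.length = N.toNat)
    (h2 : ∀ r ∈ v, r.length = M.toNat) : czero v ≤ N.toNat * M.toNat := by
  have : ∀ (l : List (List Int)), (∀ r ∈ l, r.length = M.toNat) →
      czero l ≤ l.length * M.toNat := by
    intro l
    induction l with
    | nil => intro _; simp [czero]
    | cons a t ih =>
      intro hl
      have ha : a.countP (fun z => z == 0) ≤ M.toNat := by
        calc a.countP (fun z => z == 0) ≤ a.length := List.countP_le_length
        _ = M.toNat := hl a List.mem_cons_self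
      have := ih (fun r hr => hl r (List.mem_cons_of_mem _ hr))
      simp only [czero, List.map, List.sum_cons, List.length_cons] at *
      rw [Nat.succ_mul]
      omega
  rw [← h1]; exact this v h2

theorem czero_set {N M : Int} {v : List (List Int)} {c : Int × Int}
    (h1 : v.length = N.toNat) (h2 : ∀ r ∈ v, r.length = M.toNat)
    (hc : inR N M c) (h0 : idx2 v c.1 c.2 = 0) :
    czero (vset v c.1 c.2) + 1 = czero v := by
  obtain ⟨c1, c2, c3, c4⟩ := hc
  have hcN : c.1.toNat < v.length := by omega
  have hrc : (v[c.1.toNat]).length = M.toNat := h2 _ (List.getElem_mem _)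
  have hcM : c.2.toNat < (v[c.1.toNat]).length := by omega
  rw [idx2_eq_getElem c1 hcN c3 hcM] at h0
  have hs := sum_map_set (fun r => r.countP (fun z => z == 0)) v c.1.toNat
    ((v[c.1.toNat]).set c.2.toNat 1) hcN
  have hcp := countP_set_one (v[c.1.toNat]) c.2.toNat hcM h0
  unfold czero
  rw [vset_eq_set c1 hcN c3]
  omega

theorem relA_init (N M : Int) :
    RelA N M (List.replicate N.toNat (List.replicate M.toNat 0)) ∅ := by
  refine ⟨by simp, by intro r hr; simp [List.eq_of_mem_replicate hr], ?_⟩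
  intro c hc
  obtain ⟨c1, c2, c3, c4⟩ := hc
  have hcN : c.1.toNat < (List.replicate N.toNat (List.replicate M.toNat (0 : Int))).length := by
    simp; omega
  rw [idx2_eq_getElem c1 hcN c3 (by simp; omega)]
  simp

-- ===== the generic worklist step (A side) =====

theorem reach_sub {N M : Int} {grid : List (List Int)} {V : Set (Int × Int)}
    {q : List (Int × Int)} (hInv : InvF N M grid V q) {c x : Int × Int}
    (hc : c ∈ V) (h : Reach N M grid c x) :
    x ∈ V ∨ ∃ d ∈ q, Reach N M grid d x := by
  induction h with
  | refl => exact Or.inl hc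
  | @tail b x' hr hstep ih =>
    rcases ih with hV | ⟨d, hd, hrd⟩
    · by_cases hq : b ∈ q
      · exact Or.inr ⟨b, hq, Relation.ReflTransGen.single hstep⟩
      · exact Or.inl (hInv.2.2.2 b hV hq x' hstep)
    · exact Or.inr ⟨d, hd, hrd.tail hstep⟩

theorem step_generic {N M : Int} {grid : List (List Int)} (hN : 0 < N) (hM : 0 < M)
    {V : Set (Int × Int)} {q q' new : List (Int × Int)} {c : Int × Int}
    (hc : c ∈ q)
    (hq' : ∀ x, x ∈ q' ↔ (x ∈ q ∧ x ≠ c) ∨ x ∈ new)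
    (hnd' : q'.Nodup)
    (hInv : InvF N M grid V q)
    (hsub : ∀ x ∈ new, stepTo N M grid c x ∧ x ∉ V)
    (hcomp : ∀ x, stepTo N M grid c x → x ∈ V ∨ x ∈ new) :
    InvF N M grid (V ∪ {x | x ∈ new}) q' ∧
    ∀ x, ((x ∈ V ∨ x ∈ new) ∨ ∃ d ∈ q', Reach N M grid d x) ↔
         (x ∈ V ∨ ∃ d ∈ q, Reach N M grid d x) := by
  obtain ⟨hndq, hqV, hgood, hclosed⟩ := hInv
  have hcV : c ∈ V := hqV c hc
  have hcin : inR N M c := (hgood c hcV).1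
  have hInv' : InvF N M grid (V ∪ {x | x ∈ new}) q' := by
    refine ⟨hnd', ?_, ?_, ?_⟩
    · intro x hx
      rcases (hq' x).1 hx with ⟨hxq, _⟩ | hxn
      · exact Or.inl (hqV x hxq)
      · exact Or.inr hxn
    · intro x hx
      rcases hx with hxV | hxn
      · exact hgood x hxV
      · obtain ⟨hst, _⟩ := hsub x hxn
        exact ⟨nbr_inR hN hM hcin hst.1, hst.2⟩
    · intro x hxV' hxq' x' hstep
      rcases hxV' with hxV | hxn
      · by_cases hxc : x = c
        · subst hxc
          rcases hcomp x' hstep with h | h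
          · exact Or.inl h
          · exact Or.inr h
        · by_cases hxq : x ∈ q
          · exact absurd ((hq' x).2 (Or.inl ⟨hxq, hxc⟩)) hxq'
          · exact Or.inl (hclosed x hxV hxq x' hstep)
      · exact absurd ((hq' x).2 (Or.inr hxn)) hxq'
  refine ⟨hInv', ?_⟩
  intro x
  constructor
  · rintro ((hV | hn) | ⟨d, hd, hr⟩)
    · exact Or.inl hV
    · exact Or.inr ⟨c, hc, Relation.ReflTransGen.single (hsub x hn).1⟩
    · rcases (hq' d).1 hd with ⟨hdq, _⟩ | hdn
      · exact Or.inr ⟨d, hdq, hr⟩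
      · exact Or.inr ⟨c, hc, Relation.ReflTransGen.trans
          (Relation.ReflTransGen.single (hsub d hdn).1) hr⟩
  · rintro (hV | ⟨d, hd, hr⟩)
    · exact Or.inl (Or.inl hV)
    · by_cases hdc : d = c
      · subst hdc
        have := reach_sub hInv' (Or.inl hcV) hr
        rcases this with hmem | hex
        · rcases hmem with h | h
          · exact Or.inl (Or.inl h)
          · exact Or.inl (Or.inr h)
        · exact Or.inr hex
      · exact Or.inr ⟨d, (hq' d).2 (Or.inl ⟨hd, hdc⟩), hr⟩

-- ===== A's neighbor fold =====

theorem foldMarkA {N M : Int} {grid : List (List Int)} :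
    ∀ (L : List (Int × Int)) (v : List (List Int)) (q : List (Int × Int)) (V : Set (Int × Int)),
    (∀ x ∈ L, inR N M x) → RelA N M v V →
    ∃ v' new, L.foldl (markA grid) (v, q) = (v', q ++ new) ∧
      RelA N M v' (V ∪ {x | x ∈ new}) ∧
      czero v' + new.length = czero v ∧
      new.Nodup ∧ (∀ x ∈ new, x ∈ L ∧ zeroC grid x ∧ x ∉ V) ∧
      (∀ x ∈ L, zeroC grid x → x ∈ V ∨ x ∈ new) := by
  intro L
  induction L with
  | nil =>
    intro v q V _ hrel
    refine ⟨v, [], by simp, ?_, by simp, by simp, by simp, by simp⟩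
    have : V ∪ {x | x ∈ ([] : List (Int × Int))} = V := by ext x; simp
    rw [this]; exact hrel
  | cons c L ih =>
    intro v q V hL hrel
    have hcin : inR N M c := hL c List.mem_cons_self
    have hL' : ∀ x ∈ L, inR N M x := fun x hx => hL x (List.mem_cons_of_mem _ hx)
    simp only [List.foldl_cons]
    by_cases hcond : idx2 v c.1 c.2 = 0 ∧ idx2 grid c.1 c.2 = 0
    · obtain ⟨hv0, hg0⟩ := hcond
      rw [(by simp [markA, hv0, hg0] : markA grid (v, q) c = (vset v c.1 c.2, q ++ [c]))]
      have hcV : c ∉ V := (hrel.2.2 c hcin).1 hv0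
      have hrel1 : RelA N M (vset v c.1 c.2) (V ∪ {c}) := relA_set hrel hcin
      obtain ⟨v', new', heq, hrel', hcz, hnd, hmem, hcomp⟩ :=
        ih (vset v c.1 c.2) (q ++ [c]) (V ∪ {c}) hL' hrel1
      refine ⟨v', c :: new', ?_, ?_, ?_, ?_, ?_, ?_⟩
      · rw [heq]; simp
      · have : (V ∪ {c}) ∪ {x | x ∈ new'} = V ∪ {x | x ∈ c :: new'} := by
          ext x; simp [List.mem_cons]; tauto
        rw [← this]; exact hrel'
      · have := czero_set hrel.1 hrel.2.1 hcin hv0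
        simp only [List.length_cons]
        omega
      · have hcn : c ∉ new' := fun h => ((hmem c h).2.2) (Or.inr rfl)
        exact List.nodup_cons.2 ⟨hcn, hnd⟩
      · intro x hx
        rcases List.mem_cons.1 hx with h | h
        · subst h; exact ⟨List.mem_cons_self, hg0, hcV⟩
        · obtain ⟨h1, h2, h3⟩ := hmem x h
          exact ⟨List.mem_cons_of_mem _ h1, h2, fun hxV => h3 (Or.inl hxV)⟩
      · intro x hx hz
        rcases List.mem_cons.1 hx with h | h
        · subst h; exact Or.inr List.mem_cons_self
        · rcases hcomp x h hz with hV | hn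
          · rcases hV with hV | hV
            · exact Or.inl hV
            · exact Or.inr (List.mem_cons.2 (Or.inl (by simpa using hV)))
          · exact Or.inr (List.mem_cons_of_mem _ hn)
    · rw [(by simp only [markA]; rw [if_neg hcond] : markA grid (v, q) c = (v, q))]
      obtain ⟨v', new', heq, hrel', hcz, hnd, hmem, hcomp⟩ := ih v q V hL' hrel
      refine ⟨v', new', heq, hrel', hcz, hnd, ?_, ?_⟩
      · intro x hx
        obtain ⟨h1, h2, h3⟩ := hmem x hx
        exact ⟨List.mem_cons_of_mem _ h1, h2, h3⟩
      · intro x hx hz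
        rcases List.mem_cons.1 hx with h | h
        · subst h
          have hv : idx2 v x.1 x.2 ≠ 0 := fun h0 => hcond ⟨h0, hz⟩
          have : ¬ x ∉ V := fun hnv => hv ((hrel.2.2 x hcin).2 hnv)
          exact Or.inl (not_not.1 this)
        · exact hcomp x h hz

-- ===== A's flood loop computes the reachable closure =====

theorem loopA_sim {N M : Int} {grid : List (List Int)} (hN : 0 < N) (hM : 0 < M) :
    ∀ (fuel : Nat) (v : List (List Int)) (q : List (Int × Int)) (V : Set (Int × Int)),
    RelA N M v V → InvF N M grid V q → czero v + q.length ≤ fuel →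
    ∃ V', RelA N M (loopA N M grid fuel v q) V' ∧ InvF N M grid V' [] ∧
      (∀ x, x ∈ V' ↔ x ∈ V ∨ ∃ c ∈ q, Reach N M grid c x) := by
  intro fuel
  induction fuel with
  | zero =>
    intro v q V hrel hInv hfuel
    have hq : q = [] := by
      cases q with
      | nil => rfl
      | cons a t => simp at hfuel
    subst hq
    exact ⟨V, by simpa [loopA] using hrel, hInv, by simp⟩
  | succ fuel ih =>
    intro v q V hrel hInv hfuel
    cases q with
    | nil => exact ⟨V, by simpa [loopA] using hrel, hInv, by simp⟩
    | cons c q₀ =>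
      obtain ⟨x, y⟩ := c
      have hcV : (x, y) ∈ V := hInv.2.1 _ List.mem_cons_self
      have hcin : inR N M (x, y) := (hInv.2.2.1 _ hcV).1
      have hLin : ∀ z ∈ nbrList N M x y, inR N M z := fun z hz => nbr_inR hN hM hcin hz
      obtain ⟨v', new, heq, hrel', hcz, hndnew, hmem, hcomp⟩ :=
        foldMarkA (nbrList N M x y) v q₀ V hLin hrel
      have hstep : ∀ z ∈ new, stepTo N M grid (x, y) z ∧ z ∉ V := by
        intro z hz
        obtain ⟨h1, h2, h3⟩ := hmem z hz
        exact ⟨⟨h1, h2⟩, h3⟩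
      have hcomp' : ∀ z, stepTo N M grid (x, y) z → z ∈ V ∨ z ∈ new := by
        intro z hz
        exact hcomp z hz.1 hz.2
      have hndq : ((x, y) :: q₀).Nodup := hInv.1
      have hcnq₀ : (x, y) ∉ q₀ := (List.nodup_cons.1 hndq).1
      have hnewV : ∀ z ∈ new, z ∉ V := fun z hz => (hstep z hz).2
      have hq0V : ∀ z ∈ q₀, z ∈ V := fun z hz => hInv.2.1 z (List.mem_cons_of_mem _ hz)
      have hq' : ∀ z, z ∈ q₀ ++ new ↔ (z ∈ (x, y) :: q₀ ∧ z ≠ (x, y)) ∨ z ∈ new := by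
        intro z
        constructor
        · intro hz
          rcases List.mem_append.1 hz with h | h
          · exact Or.inl ⟨List.mem_cons_of_mem _ h, fun he => hcnq₀ (he ▸ h)⟩
          · exact Or.inr h
        · rintro (⟨hz, hne⟩ | hz)
          · rcases List.mem_cons.1 hz with h | h
            · exact absurd h hne
            · exact List.mem_append.2 (Or.inl h)
          · exact List.mem_append.2 (Or.inr hz)
      have hnd' : (q₀ ++ new).Nodup := by
        apply List.Nodup.append (List.nodup_cons.1 hndq).2 hndnew
        intro z hz1 hz2
        exact hnewV z hz2 (hq0V z hz1)
      obtain ⟨hInv', hW⟩ := step_generic hN hM (List.mem_cons_self) hq' hnd' hInv hstep hcomp'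
      have hfuel' : czero v' + (q₀ ++ new).length ≤ fuel := by
        simp only [List.length_append, List.length_cons] at *
        omega
      obtain ⟨V', hrelV', hInvV', hchar⟩ := ih v' (q₀ ++ new) (V ∪ {z | z ∈ new}) hrel' hInv' hfuel'
      refine ⟨V', ?_, hInvV', ?_⟩
      · have : loopA N M grid (fuel + 1) v ((x, y) :: q₀) = loopA N M grid fuel v' (q₀ ++ new) := by
          simp only [loopA]
          rw [stepA_eq_markA N M grid x y (v, q₀) hcin, heq]
        rw [this]; exact hrelV'
      · intro z
        rw [hchar z]
        have := hW z
        simp only [Set.mem_union, Set.mem_setOf_eq] at *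
        tauto

-- ===== the abstract scanner's equations =====

theorem absScan_cons_pos {N M : Int} {grid : List (List Int)} {c : Int × Int}
    {cs : List (Int × Int)} {V : Set (Int × Int)} {n : Int}
    (h : c ∉ V ∧ zeroC grid c) :
    absScan N M grid (c :: cs) V n =
      absScan N M grid cs {x | x ∈ V ∨ Reach N M grid c x} (n + 1) := by
  rw [absScan]; exact if_pos h

theorem absScan_cons_neg {N M : Int} {grid : List (List Int)} {c : Int × Int}
    {cs : List (Int × Int)} {V : Set (Int × Int)} {n : Int}
    (h : ¬ (c ∉ V ∧ zeroC grid c)) :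
    absScan N M grid (c :: cs) V n = absScan N M grid cs V n := by
  rw [absScan]; exact if_neg h

-- ===== A's outer scan =====

theorem outerA {N M : Int} {grid : List (List Int)} (hN : 0 < N) (hM : 0 < M) :
    ∀ (cells : List (Int × Int)) (v : List (List Int)) (V : Set (Int × Int)) (n : Int),
    (∀ c ∈ cells, inR N M c) → RelA N M v V → InvF N M grid V [] →
    (cells.foldl (fun (s : List (List Int) × Int) c =>
        if idx2 s.1 c.1 c.2 = 0 ∧ idx2 grid c.1 c.2 = 0 then
          (loopA N M grid (N.toNat * M.toNat) (vset s.1 c.1 c.2) [c], s.2 + 1)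
        else s) (v, n)).2 = absScan N M grid cells V n := by
  intro cells
  induction cells with
  | nil => intro v V n _ _ _; rfl
  | cons c cs ih =>
    intro v V n hcells hrel hInv
    have hcin : inR N M c := hcells c List.mem_cons_self
    have hcs : ∀ d ∈ cs, inR N M d := fun d hd => hcells d (List.mem_cons_of_mem _ hd)
    simp only [List.foldl_cons]
    split_ifs with hcond
    · obtain ⟨hv0, hg0⟩ := hcond
      have hcV : c ∉ V := (hrel.2.2 c hcin).1 hv0
      have habs : c ∉ V ∧ zeroC grid c := ⟨hcV, hg0⟩
      rw [absScan_cons_pos habs]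
      have hrel1 : RelA N M (vset v c.1 c.2) (V ∪ {c}) := relA_set hrel hcin
      have hInv1 : InvF N M grid (V ∪ {c}) [c] := by
        refine ⟨List.nodup_singleton c, by simp, ?_, ?_⟩
        · intro d hd
          rcases hd with hd | hd
          · exact hInv.2.2.1 d hd
          · simp at hd; subst hd; exact ⟨hcin, hg0⟩
        · intro d hd hdq d' hstep
          rcases hd with hd | hd
          · exact Or.inl (hInv.2.2.2 d hd (by simp) d' hstep)
          · simp at hd; subst hd; exact absurd (List.mem_singleton.2 rfl) hdq
      have hfuel : czero (vset v c.1 c.2) + [c].length ≤ N.toNat * M.toNat := by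
        have h1 := czero_set hrel.1 hrel.2.1 hcin hv0
        have h2 := czero_le hrel.1 hrel.2.1
        simp only [List.length_singleton]
        omega
      obtain ⟨V', hrelV', hInvV', hchar⟩ :=
        loopA_sim hN hM (N.toNat * M.toNat) (vset v c.1 c.2) [c] (V ∪ {c}) hrel1 hInv1 hfuel
      have hVeq : V' = {x | x ∈ V ∨ Reach N M grid c x} := by
        ext z
        rw [hchar z]
        simp only [Set.mem_union, Set.mem_setOf_eq, Set.mem_singleton_iff, List.mem_singleton]
        constructor
        · rintro ((h | h) | ⟨d, hd, hr⟩)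
          · exact Or.inl h
          · subst h; exact Or.inr Relation.ReflTransGen.refl
          · subst hd; exact Or.inr hr
        · rintro (h | h)
          · exact Or.inl (Or.inl h)
          · exact Or.inr ⟨c, rfl, h⟩
      rw [hVeq] at hrelV' hInvV'
      exact ih _ _ _ hcs hrelV' hInvV'
    · have habs : ¬ (c ∉ V ∧ zeroC grid c) := by
        intro ⟨h1, h2⟩
        exact hcond ⟨(hrel.2.2 c hcin).2 h1, h2⟩
      rw [absScan_cons_neg habs]
      exact ih _ _ _ hcs hrel hInv

-- ===================================================================
-- ===== B side: union-find over flattened cells =====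
-- ===================================================================

def idxM (M : Int) (c : Int × Int) : Int := c.1 * M + c.2
def unidxM (M : Int) (a : Int) : Int × Int := (a / M, a % M)

def edgeTargets (N M : Int) (c : Int × Int) : List (Int × Int) :=
  [(c.1, PySem.Int.mod (c.2 + 1) M), (PySem.Int.mod (c.1 + 1) N, c.2)]

-- DSU model
def RootP (p : List Int) (x : Int) : Int := findP p p.length x
def Pinv (p : List Int) : Prop :=
  ∀ x : Int, 0 ≤ x → x < (p.length : Int) →
    0 ≤ PySem.List.pyGetD p x 0 ∧ PySem.List.pyGetD p x 0 ≤ x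
def ConnP (N M : Int) (grid : List (List Int)) (p : List Int) : Prop :=
  ∀ x : Int, 0 ≤ x → x < (p.length : Int) →
    Relation.EqvGen (Adj N M grid) (unidxM M x) (unidxM M (RootP p x))
def IstD (N M : Int) (grid : List (List Int)) (p : List Int) : Prop :=
  (p.length : Int) = N * M ∧ Pinv p ∧ ConnP N M grid p
def QD (N M : Int) (grid : List (List Int)) (c : Int × Int) (p : List Int) : Prop :=
  goodC N M grid c → ∀ d ∈ edgeTargets N M c, zeroC grid d →
    RootP p (idxM M c) = RootP p (idxM M d)

theorem findP_le {p : List Int} (hp : Pinv p) :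
    ∀ (k : Nat) (x : Int), 0 ≤ x → x < (p.length : Int) → x.toNat ≤ k →
    ∀ f : Nat, x.toNat + 1 ≤ f → findP p f x = findP p (x.toNat + 1) x := by
  intro k
  induction k with
  | zero =>
    intro x h0 h1 hk f hf
    have hx : x = 0 := by omega
    subst hx
    obtain ⟨f, rfl⟩ : ∃ f', f = f' + 1 := ⟨f - 1, by omega⟩
    have hfix : PySem.List.pyGetD p (0 : Int) 0 = 0 := by
      have := hp 0 le_rfl h1
      omega
    simp [findP, hfix]
  | succ k ih =>
    intro x h0 h1 hk f hf
    obtain ⟨f, rfl⟩ : ∃ f', f = f' + 1 := ⟨f - 1, by omega⟩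
    by_cases hfix : PySem.List.pyGetD p x 0 = x
    · simp [findP, hfix]
    · have hpx := hp x h0 h1
      set px := PySem.List.pyGetD p x 0 with hpxdef
      have hlt : px < x := lt_of_le_of_ne hpx.2 hfix
      have hpx0 : 0 ≤ px := hpx.1
      have hxpos : 0 < x := by omega
      have htn : px.toNat ≤ k := by omega
      have h1' : px < (p.length : Int) := by omega
      have e1 : findP p (f + 1) x = findP p f px := by
        simp only [findP, ← hpxdef, if_neg hfix]
      have e2 : findP p (x.toNat + 1) x = findP p x.toNat px := by
        simp only [findP, ← hpxdef, if_neg hfix]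
      rw [e1, e2, ih px hpx0 h1' htn f (by omega), ih px hpx0 h1' htn x.toNat (by omega)]

theorem rootP_eq_canon {p : List Int} (hp : Pinv p) {x : Int}
    (h0 : 0 ≤ x) (h1 : x < (p.length : Int)) :
    RootP p x = findP p (x.toNat + 1) x :=
  findP_le hp x.toNat x h0 h1 le_rfl p.length (by omega)

theorem rootP_fix {p : List Int} (hp : Pinv p) {x : Int}
    (h0 : 0 ≤ x) (h1 : x < (p.length : Int)) (hfix : PySem.List.pyGetD p x 0 = x) :
    RootP p x = x := by
  rw [rootP_eq_canon hp h0 h1]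
  simp [findP, hfix]

theorem rootP_rec {p : List Int} (hp : Pinv p) {x : Int}
    (h0 : 0 ≤ x) (h1 : x < (p.length : Int)) (hne : PySem.List.pyGetD p x 0 ≠ x) :
    RootP p x = RootP p (PySem.List.pyGetD p x 0) := by
  have hpx := hp x h0 h1
  set px := PySem.List.pyGetD p x 0 with hpxdef
  have hlt : px < x := lt_of_le_of_ne hpx.2 hne
  have h1' : px < (p.length : Int) := by omega
  rw [rootP_eq_canon hp h0 h1]
  have e2 : findP p (x.toNat + 1) x = findP p x.toNat px := by
    simp only [findP, ← hpxdef, if_neg hne]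
  rw [e2, findP_le hp px.toNat px hpx.1 h1' le_rfl x.toNat (by omega)]
  exact (findP_le hp px.toNat px hpx.1 h1' le_rfl p.length (by omega)).symm ▸ rfl

theorem rootP_spec_aux {p : List Int} (hp : Pinv p) :
    ∀ (k : Nat) (x : Int), 0 ≤ x → x < (p.length : Int) → x.toNat ≤ k →
    0 ≤ RootP p x ∧ RootP p x ≤ x ∧ PySem.List.pyGetD p (RootP p x) 0 = RootP p x := by
  intro k
  induction k with
  | zero =>
    intro x h0 h1 hk
    have hx : x = 0 := by omega
    subst hx
    have hfix : PySem.List.pyGetD p (0 : Int) 0 = 0 := by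
      have := hp 0 le_rfl h1
      omega
    rw [rootP_fix hp le_rfl h1 hfix]
    exact ⟨le_rfl, le_rfl, hfix⟩
  | succ k ih =>
    intro x h0 h1 hk
    by_cases hfix : PySem.List.pyGetD p x 0 = x
    · rw [rootP_fix hp h0 h1 hfix]
      exact ⟨h0, le_rfl, hfix⟩
    · have hpx := hp x h0 h1
      have hlt : PySem.List.pyGetD p x 0 < x := lt_of_le_of_ne hpx.2 hfix
      have h1' : PySem.List.pyGetD p x 0 < (p.length : Int) := by omega
      rw [rootP_rec hp h0 h1 hfix]
      obtain ⟨a, b, c⟩ := ih (PySem.List.pyGetD p x 0) hpx.1 h1' (by omega)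
      exact ⟨a, by omega, c⟩

theorem rootP_spec {p : List Int} (hp : Pinv p) {x : Int}
    (h0 : 0 ≤ x) (h1 : x < (p.length : Int)) :
    0 ≤ RootP p x ∧ RootP p x ≤ x ∧ PySem.List.pyGetD p (RootP p x) 0 = RootP p x :=
  rootP_spec_aux hp x.toNat x h0 h1 le_rfl

theorem getP_set {p : List Int} {r s x : Int} (hr0 : 0 ≤ r) (hr1 : r < (p.length : Int))
    (hx0 : 0 ≤ x) (hx1 : x < (p.length : Int)) :
    PySem.List.pyGetD (PySem.List.pySetD p r s) x 0 =
      if x = r then s else PySem.List.pyGetD p x 0 := by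
  rw [PySem.List.pySetD_of_nonneg _ _ hr0,
      PySem.List.pyGetD_eq_getElem _ _ hx0 (by simp; omega),
      List.getElem_set]
  by_cases h : r.toNat = x.toNat
  · rw [if_pos h, if_pos (by omega)]
  · rw [if_neg h, if_neg (by omega), PySem.List.pyGetD_eq_getElem _ _ hx0 (by omega)]

theorem pinv_set {p : List Int} (hp : Pinv p) {r s : Int}
    (hr0 : 0 ≤ r) (hr1 : r < (p.length : Int)) (hs0 : 0 ≤ s) (hsr : s ≤ r) :
    Pinv (PySem.List.pySetD p r s) := by
  intro x h0 h1
  rw [PySem.List.length_pySetD] at h1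
  rw [getP_set hr0 hr1 h0 h1]
  by_cases h : x = r
  · rw [if_pos h]; omega
  · rw [if_neg h]; exact hp x h0 h1

theorem rootP_set_aux {p : List Int} (hp : Pinv p) {r s : Int}
    (hr0 : 0 ≤ r) (hr1 : r < (p.length : Int)) (hs0 : 0 ≤ s) (hsr : s < r)
    (hrootr : PySem.List.pyGetD p r 0 = r) (hroots : PySem.List.pyGetD p s 0 = s) :
    ∀ (k : Nat) (x : Int), 0 ≤ x → x < (p.length : Int) → x.toNat ≤ k →
      RootP (PySem.List.pySetD p r s) x = if RootP p x = r then s else RootP p x := by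
  have hp' : Pinv (PySem.List.pySetD p r s) := pinv_set hp hr0 hr1 hs0 (le_of_lt hsr)
  have hlen : ((PySem.List.pySetD p r s).length : Int) = (p.length : Int) := by
    rw [PySem.List.length_pySetD]
  intro k
  induction k with
  | zero =>
    intro x h0 h1 hk
    have hx : x = 0 := by omega
    subst hx
    have hrne : (0 : Int) ≠ r := by omega
    have hfix : PySem.List.pyGetD p (0 : Int) 0 = 0 := by
      have := hp 0 le_rfl h1
      omega
    have hfix' : PySem.List.pyGetD (PySem.List.pySetD p r s) (0 : Int) 0 = 0 := by
      rw [getP_set hr0 hr1 le_rfl h1, if_neg hrne]; exact hfix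
    rw [rootP_fix hp' le_rfl (by omega) hfix', rootP_fix hp le_rfl h1 hfix, if_neg hrne]
  | succ k ih =>
    intro x h0 h1 hk
    by_cases hxr : x = r
    · subst hxr
      have hRx : RootP p x = x := rootP_fix hp h0 h1 hrootr
      rw [hRx, if_pos rfl]
      have hget : PySem.List.pyGetD (PySem.List.pySetD p x s) x 0 = s := by
        rw [getP_set hr0 hr1 h0 h1, if_pos rfl]
      have hne : PySem.List.pyGetD (PySem.List.pySetD p x s) x 0 ≠ x := by
        rw [hget]; omega
      rw [rootP_rec hp' h0 (by omega) hne, hget]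
      have hgs : PySem.List.pyGetD (PySem.List.pySetD p x s) s 0 = s := by
        rw [getP_set hr0 hr1 hs0 (by omega), if_neg (by omega)]; exact hroots
      exact rootP_fix hp' hs0 (by omega) hgs
    · have hget : PySem.List.pyGetD (PySem.List.pySetD p r s) x 0 = PySem.List.pyGetD p x 0 := by
        rw [getP_set hr0 hr1 h0 h1, if_neg hxr]
      by_cases hfix : PySem.List.pyGetD p x 0 = x
      · have hRx : RootP p x = x := rootP_fix hp h0 h1 hfix
        have hRx' : RootP (PySem.List.pySetD p r s) x = x :=
          rootP_fix hp' h0 (by omega) (by rw [hget]; exact hfix)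
        rw [hRx, hRx', if_neg hxr]
      · have hpx := hp x h0 h1
        have hlt : PySem.List.pyGetD p x 0 < x := lt_of_le_of_ne hpx.2 hfix
        have h1' : PySem.List.pyGetD p x 0 < (p.length : Int) := by omega
        rw [rootP_rec hp' h0 (by omega) (by rw [hget]; exact hfix), hget,
            rootP_rec hp h0 h1 hfix]
        exact ih (PySem.List.pyGetD p x 0) hpx.1 h1' (by omega)

theorem rootP_set {p : List Int} (hp : Pinv p) {r s : Int}
    (hr0 : 0 ≤ r) (hr1 : r < (p.length : Int)) (hs0 : 0 ≤ s) (hsr : s < r)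
    (hrootr : PySem.List.pyGetD p r 0 = r) (hroots : PySem.List.pyGetD p s 0 = s) :
    ∀ x : Int, 0 ≤ x → x < (p.length : Int) →
      RootP (PySem.List.pySetD p r s) x = if RootP p x = r then s else RootP p x :=
  fun x h0 h1 => rootP_set_aux hp hr0 hr1 hs0 hsr hrootr hroots x.toNat x h0 h1 le_rfl

theorem unionE_root {p : List Int} (hp : Pinv p) {u v : Int}
    (hu0 : 0 ≤ u) (hu1 : u < (p.length : Int)) (hv0 : 0 ≤ v) (hv1 : v < (p.length : Int)) :
    (unionE p u v).length = p.length ∧ Pinv (unionE p u v) ∧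
    RootP (unionE p u v) u = RootP (unionE p u v) v ∧
    (∀ x y : Int, 0 ≤ x → x < (p.length : Int) → 0 ≤ y → y < (p.length : Int) →
      RootP p x = RootP p y → RootP (unionE p u v) x = RootP (unionE p u v) y) ∧
    (∀ x : Int, 0 ≤ x → x < (p.length : Int) →
      RootP (unionE p u v) x = RootP p x ∨
      ((RootP (unionE p u v) x = RootP p u ∨ RootP (unionE p u v) x = RootP p v) ∧
       (RootP p x = RootP p u ∨ RootP p x = RootP p v))) := by
  obtain ⟨hA0, hAu, hAfix⟩ := rootP_spec hp hu0 hu1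
  obtain ⟨hB0, hBv, hBfix⟩ := rootP_spec hp hv0 hv1
  have hun : unionE p u v = if RootP p u ≠ RootP p v then
      (if RootP p u < RootP p v then PySem.List.pySetD p (RootP p v) (RootP p u)
       else PySem.List.pySetD p (RootP p u) (RootP p v)) else p := rfl
  by_cases hab : RootP p u = RootP p v
  · have he : unionE p u v = p := by rw [hun, if_neg (not_not_intro hab)]
    rw [he]
    exact ⟨rfl, hp, hab, fun x y _ _ _ _ h => h, fun x _ _ => Or.inl rfl⟩
  · by_cases halt : RootP p u < RootP p v
    · have he : unionE p u v = PySem.List.pySetD p (RootP p v) (RootP p u) := by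
        rw [hun, if_pos hab, if_pos halt]
      have hkey := rootP_set hp hB0 (by omega) hA0 halt hBfix hAfix
      have hlen : (unionE p u v).length = p.length := by rw [he, PySem.List.length_pySetD]
      have hrw : ∀ x : Int, 0 ≤ x → x < (p.length : Int) →
          RootP (unionE p u v) x = if RootP p x = RootP p v then RootP p u else RootP p x := by
        intro x h0 h1
        rw [he]; exact hkey x h0 h1
      refine ⟨hlen, by rw [he]; exact pinv_set hp hB0 (by omega) hA0 (le_of_lt halt), ?_, ?_, ?_⟩
      · rw [hrw u hu0 hu1, hrw v hv0 hv1, if_neg hab, if_pos rfl]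
      · intro x y hx0 hx1 hy0 hy1 hxy
        rw [hrw x hx0 hx1, hrw y hy0 hy1, hxy]
      · intro x h0 h1
        rw [hrw x h0 h1]
        by_cases hc : RootP p x = RootP p v
        · rw [if_pos hc]
          exact Or.inr ⟨Or.inl rfl, Or.inr hc⟩
        · rw [if_neg hc]
          exact Or.inl rfl
    · have hba : RootP p v < RootP p u := by omega
      have he : unionE p u v = PySem.List.pySetD p (RootP p u) (RootP p v) := by
        rw [hun, if_pos hab, if_neg halt]
      have hkey := rootP_set hp hA0 (by omega) hB0 hba hAfix hBfix
      have hlen : (unionE p u v).length = p.length := by rw [he, PySem.List.length_pySetD]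
      have hrw : ∀ x : Int, 0 ≤ x → x < (p.length : Int) →
          RootP (unionE p u v) x = if RootP p x = RootP p u then RootP p v else RootP p x := by
        intro x h0 h1
        rw [he]; exact hkey x h0 h1
      refine ⟨hlen, by rw [he]; exact pinv_set hp hA0 (by omega) hB0 (le_of_lt hba), ?_, ?_, ?_⟩
      · rw [hrw u hu0 hu1, hrw v hv0 hv1, if_pos rfl, if_neg (fun h => hab h.symm)]
      · intro x y hx0 hx1 hy0 hy1 hxy
        rw [hrw x hx0 hx1, hrw y hy0 hy1, hxy]
      · intro x h0 h1
        rw [hrw x h0 h1]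
        by_cases hc : RootP p x = RootP p u
        · rw [if_pos hc]
          exact Or.inr ⟨Or.inr rfl, Or.inl hc⟩
        · rw [if_neg hc]
          exact Or.inl rfl

-- ===== torus arithmetic =====

theorem idxM_range {N M : Int} (hM : 0 < M) {c : Int × Int} (hc : inR N M c) :
    0 ≤ idxM M c ∧ idxM M c < N * M := by
  obtain ⟨h1, h2, h3, h4⟩ := hc
  constructor
  · have : 0 ≤ c.1 * M := mul_nonneg h1 (le_of_lt hM)
    unfold idxM; omega
  · have h5 : c.1 * M + c.2 < c.1 * M + M := by omega
    have h6 : c.1 * M + M = (c.1 + 1) * M := by ring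
    have h7 : (c.1 + 1) * M ≤ N * M := mul_le_mul_of_nonneg_right (by omega) (le_of_lt hM)
    unfold idxM; omega

theorem unidxM_idxM {M : Int} (hM : 0 < M) {c : Int × Int} (h3 : 0 ≤ c.2) (h4 : c.2 < M) :
    unidxM M (idxM M c) = c := by
  unfold unidxM idxM
  have hdiv : (c.1 * M + c.2) / M = c.1 := by
    rw [add_comm, Int.add_mul_ediv_right _ _ (by omega : M ≠ 0),
        Int.ediv_eq_zero_of_lt h3 h4]
    ring
  have hmod : (c.1 * M + c.2) % M = c.2 := by
    rw [add_comm, Int.add_mul_emod_self_right]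
    exact Int.emod_eq_of_lt h3 h4
  rw [hdiv, hmod]

theorem idxM_unidxM {M a : Int} (hM : 0 < M) : idxM M (unidxM M a) = a := by
  unfold unidxM idxM
  simp only
  rw [mul_comm]
  exact Int.mul_ediv_add_emod a M

theorem unidxM_inR {N M a : Int} (hM : 0 < M) (h0 : 0 ≤ a) (h1 : a < N * M) :
    inR N M (unidxM M a) := by
  refine ⟨Int.ediv_nonneg h0 (le_of_lt hM), ?_, Int.emod_nonneg a (by omega),
    Int.emod_lt_of_pos a hM⟩
  exact (Int.ediv_lt_iff_lt_mul hM).2 (by rw [mul_comm] at h1 ⊢; exact h1)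

theorem modAdd {x N : Int} (hN : 0 < N) (h0 : 0 ≤ x) (h1 : x < N) :
    PySem.Int.mod (PySem.Int.mod (x - 1) N + 1) N = x := by
  rw [PySem.Int.mod_eq_emod_of_pos hN, PySem.Int.mod_eq_emod_of_pos hN,
      Int.emod_add_emod, sub_add_cancel, Int.emod_eq_of_lt h0 h1]

theorem modSub {x N : Int} (hN : 0 < N) (h0 : 0 ≤ x) (h1 : x < N) :
    PySem.Int.mod (PySem.Int.mod (x + 1) N - 1) N = x := by
  rw [PySem.Int.mod_eq_emod_of_pos hN, PySem.Int.mod_eq_emod_of_pos hN]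
  have : (x + 1) % N - 1 = (x + 1) - 1 - N * ((x + 1) / N) := by
    rw [Int.emod_def]; ring
  rw [this, Int.sub_mul_emod_self_left, add_sub_cancel_right, Int.emod_eq_of_lt h0 h1]

theorem nbr_symm {N M : Int} (hN : 0 < N) (hM : 0 < M) {c d : Int × Int}
    (hc : inR N M c) (hd : inR N M d) (h : d ∈ nbrList N M c.1 c.2) :
    c ∈ nbrList N M d.1 d.2 := by
  obtain ⟨c1, c2, c3, c4⟩ := hc
  simp only [nbrList, List.mem_cons, List.not_mem_nil, or_false] at h ⊢
  rcases h with h | h | h | h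
  · subst h
    right; left
    show c = (PySem.Int.mod (PySem.Int.mod (c.1 - 1) N + 1) N, c.2)
    rw [modAdd hN c1 c2]
  · subst h
    left
    show c = (PySem.Int.mod (PySem.Int.mod (c.1 + 1) N - 1) N, c.2)
    rw [modSub hN c1 c2]
  · subst h
    right; right; right
    show c = (c.1, PySem.Int.mod (PySem.Int.mod (c.2 - 1) M + 1) M)
    rw [modAdd hM c3 c4]
  · subst h
    right; right; left
    show c = (c.1, PySem.Int.mod (PySem.Int.mod (c.2 + 1) M - 1) M)
    rw [modSub hM c3 c4]

-- ===== Reach coincides with the equivalence closure of Adj on good cells =====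

theorem eqv_good {N M : Int} {grid : List (List Int)} {c d : Int × Int}
    (h : Relation.EqvGen (Adj N M grid) c d) :
    c = d ∨ (goodC N M grid c ∧ goodC N M grid d) := by
  induction h with
  | rel a b hab => exact Or.inr ⟨hab.1, hab.2.1⟩
  | refl a => exact Or.inl rfl
  | symm a b _ ih =>
    rcases ih with h | h
    · exact Or.inl h.symm
    · exact Or.inr ⟨h.2, h.1⟩
  | trans a b c _ _ ih1 ih2 =>
    rcases ih1 with h1 | h1
    · rcases ih2 with h2 | h2
      · exact Or.inl (h1.trans h2)
      · exact Or.inr ⟨h1 ▸ h2.1, h2.2⟩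
    · rcases ih2 with h2 | h2
      · exact Or.inr ⟨h1.1, h2 ▸ h1.2⟩
      · exact Or.inr ⟨h1.1, h2.2⟩

theorem reach_good {N M : Int} {grid : List (List Int)} (hN : 0 < N) (hM : 0 < M)
    {c x : Int × Int} (hc : goodC N M grid c) (h : Reach N M grid c x) :
    goodC N M grid x := by
  induction h with
  | refl => exact hc
  | tail hr hstep ih => exact ⟨nbr_inR hN hM ih.1 hstep.1, hstep.2⟩

theorem reach_symm {N M : Int} {grid : List (List Int)} (hN : 0 < N) (hM : 0 < M)
    {a b : Int × Int} (ha : goodC N M grid a) (h : Reach N M grid a b) :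
    Reach N M grid b a := by
  induction h with
  | refl => exact Relation.ReflTransGen.refl
  | @tail b c' hr hstep ih =>
    have hgb : goodC N M grid b := reach_good hN hM ha hr
    have hgc' : inR N M c' := nbr_inR hN hM hgb.1 hstep.1
    have hrev : stepTo N M grid c' b := ⟨nbr_symm hN hM hgb.1 hgc' hstep.1, hgb.2⟩
    exact Relation.ReflTransGen.trans (Relation.ReflTransGen.single hrev) ih

theorem reach_to_eqv {N M : Int} {grid : List (List Int)} (hN : 0 < N) (hM : 0 < M)
    {c x : Int × Int} (hc : goodC N M grid c) (h : Reach N M grid c x) :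
    Relation.EqvGen (Adj N M grid) c x := by
  induction h with
  | refl => exact Relation.EqvGen.refl c
  | @tail b x' hr hstep ih =>
    have hgb : goodC N M grid b := reach_good hN hM hc hr
    have hgx : goodC N M grid x' := ⟨nbr_inR hN hM hgb.1 hstep.1, hstep.2⟩
    exact Relation.EqvGen.trans _ _ _ ih (Relation.EqvGen.rel _ _ ⟨hgb, hgx, hstep.1⟩)

theorem eqv_to_reach {N M : Int} {grid : List (List Int)} (hN : 0 < N) (hM : 0 < M) :
    ∀ {c x : Int × Int}, Relation.EqvGen (Adj N M grid) c x → goodC N M grid c →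
    Reach N M grid c x := by
  intro c x h
  induction h with
  | rel a b hab => exact fun _ => Relation.ReflTransGen.single ⟨hab.2.2, hab.2.1.2⟩
  | refl a => exact fun _ => Relation.ReflTransGen.refl
  | @symm a b h ih =>
    intro hgb
    rcases eqv_good h with he | ⟨hga, _⟩
    · subst he; exact Relation.ReflTransGen.refl
    · exact reach_symm hN hM hga (ih hga)
  | @trans a b c h1 h2 ih1 ih2 =>
    intro hga
    rcases eqv_good h1 with he | ⟨_, hgb⟩
    · subst he; exact ih2 hga
    · exact Relation.ReflTransGen.trans (ih1 hga) (ih2 hgb)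

theorem reach_iff_eqv {N M : Int} {grid : List (List Int)} (hN : 0 < N) (hM : 0 < M)
    {c x : Int × Int} (hc : goodC N M grid c) :
    Reach N M grid c x ↔ Relation.EqvGen (Adj N M grid) c x :=
  ⟨reach_to_eqv hN hM hc, fun h => eqv_to_reach hN hM h hc⟩

-- ===== the edge targets are neighbors, and cover the adjacency =====

theorem edgeTargets_nbr {N M : Int} {c : Int × Int} {d : Int × Int}
    (h : d ∈ edgeTargets N M c) : d ∈ nbrList N M c.1 c.2 := by
  simp only [edgeTargets, List.mem_cons, List.not_mem_nil, or_false] at h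
  simp only [nbrList, List.mem_cons, List.not_mem_nil, or_false]
  rcases h with h | h
  · right; right; right; exact h
  · right; left; exact h

theorem edgeTargets_inR {N M : Int} (hN : 0 < N) (hM : 0 < M) {c d : Int × Int}
    (hc : inR N M c) (h : d ∈ edgeTargets N M c) : inR N M d :=
  nbr_inR hN hM hc (edgeTargets_nbr h)

-- every adjacency is a right/down edge of one of its endpoints
theorem adj_cover {N M : Int} (hN : 0 < N) (hM : 0 < M) {c d : Int × Int}
    (hc : inR N M c) (h : d ∈ nbrList N M c.1 c.2) :
    d ∈ edgeTargets N M c ∨ c ∈ edgeTargets N M d := by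
  obtain ⟨c1, c2, c3, c4⟩ := hc
  simp only [nbrList, List.mem_cons, List.not_mem_nil, or_false] at h
  simp only [edgeTargets, List.mem_cons, List.not_mem_nil, or_false]
  rcases h with h | h | h | h
  · subst h
    right; right
    show c = (PySem.Int.mod (PySem.Int.mod (c.1 - 1) N + 1) N, c.2)
    rw [modAdd hN c1 c2]
  · subst h
    left; right
    rfl
  · subst h
    right; left
    show c = (c.1, PySem.Int.mod (PySem.Int.mod (c.2 - 1) M + 1) M)
    rw [modAdd hM c3 c4]
  · subst h
    left; left
    rfl

-- ===== generic foldl with invariant and established-then-preserved facts =====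

theorem foldl_inv_establish {σ α : Type} (f : σ → α → σ) (I : σ → Prop) (Q : α → σ → Prop) :
    ∀ (l : List α),
    (∀ s a, a ∈ l → I s → I (f s a)) →
    (∀ s a b, b ∈ l → I s → Q a s → Q a (f s b)) →
    (∀ s a, a ∈ l → I s → Q a (f s a)) →
    ∀ s, I s → I (l.foldl f s) ∧ (∀ a ∈ l, Q a (l.foldl f s)) ∧
      (∀ a, Q a s → Q a (l.foldl f s)) := by
  intro l
  induction l with
  | nil => intro _ _ _ s hs; exact ⟨hs, by simp, fun a h => h⟩
  | cons c t ih =>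
    intro hI hmono hest s hs
    simp only [List.foldl_cons]
    have hI' : I (f s c) := hI s c List.mem_cons_self hs
    obtain ⟨h1, h2, h3⟩ := ih
      (fun s a ha hs => hI s a (List.mem_cons_of_mem _ ha) hs)
      (fun s a b hb hs hq => hmono s a b (List.mem_cons_of_mem _ hb) hs hq)
      (fun s a ha hs => hest s a (List.mem_cons_of_mem _ ha) hs)
      (f s c) hI'
    refine ⟨h1, ?_, ?_⟩
    · intro a ha
      rcases List.mem_cons.1 ha with h | h
      · subst h; exact h3 a (hest s a List.mem_cons_self hs)
      · exact h2 a h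
    · intro a hq
      exact h3 a (hmono s a c List.mem_cons_self hs hq)

-- ===== the union fold maintains IstD, preserves root equalities, establishes QD =====

theorem ustep_all {N M : Int} {grid : List (List Int)} (hN : 0 < N) (hM : 0 < M)
    {p : List Int} (hI : IstD N M grid p) {c d : Int × Int} (hc : inR N M c)
    (hzc : zeroC grid c) (hd : inR N M d) (hmem : d ∈ nbrList N M c.1 c.2) :
    IstD N M grid (if idx2 grid d.1 d.2 = 0 then unionE p (idxM M c) (idxM M d) else p) ∧
    (∀ x y : Int, 0 ≤ x → x < N * M → 0 ≤ y → y < N * M →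
      RootP p x = RootP p y →
      RootP (if idx2 grid d.1 d.2 = 0 then unionE p (idxM M c) (idxM M d) else p) x =
      RootP (if idx2 grid d.1 d.2 = 0 then unionE p (idxM M c) (idxM M d) else p) y) ∧
    (zeroC grid d →
      RootP (if idx2 grid d.1 d.2 = 0 then unionE p (idxM M c) (idxM M d) else p) (idxM M c) =
      RootP (if idx2 grid d.1 d.2 = 0 then unionE p (idxM M c) (idxM M d) else p) (idxM M d)) := by
  obtain ⟨hlen, hp, hconn⟩ := hI
  by_cases hzd : zeroC grid d
  · have hzd' : idx2 grid d.1 d.2 = 0 := hzd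
    rw [if_pos hzd']
    have hu := idxM_range hM hc
    have hv := idxM_range hM hd
    have hu1 : idxM M c < (p.length : Int) := by omega
    have hv1 : idxM M d < (p.length : Int) := by omega
    obtain ⟨hlen', hp', hroots, hmono, hcases⟩ :=
      unionE_root hp hu.1 hu1 hv.1 hv1
    have hAdj : Relation.EqvGen (Adj N M grid) c d :=
      Relation.EqvGen.rel _ _ ⟨⟨hc, hzc⟩, ⟨hd, hzd⟩, hmem⟩
    have huc : unidxM M (idxM M c) = c := unidxM_idxM hM hc.2.2.1 hc.2.2.2
    have hud : unidxM M (idxM M d) = d := unidxM_idxM hM hd.2.2.1 hd.2.2.2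
    have hcls : ∀ t : Int, (t = RootP p (idxM M c) ∨ t = RootP p (idxM M d)) →
        Relation.EqvGen (Adj N M grid) (unidxM M t) c := by
      intro t ht
      rcases ht with ht | ht
      · subst ht
        have := hconn (idxM M c) hu.1 hu1
        rw [huc] at this
        exact Relation.EqvGen.symm _ _ this
      · subst ht
        have := hconn (idxM M d) hv.1 hv1
        rw [hud] at this
        exact Relation.EqvGen.trans _ _ _ (Relation.EqvGen.symm _ _ this)
          (Relation.EqvGen.symm _ _ hAdj)
    refine ⟨⟨by rw [hlen']; exact hlen, hp', ?_⟩, ?_, fun _ => hroots⟩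
    · intro x h0 h1
      rw [hlen'] at h1
      rcases hcases x h0 h1 with hsame | ⟨hnew, hold⟩
      · rw [hsame]
        exact hconn x h0 h1
      · have h1n : x < N * M := by omega
        have hx := hconn x h0 h1
        exact Relation.EqvGen.trans _ _ _ (Relation.EqvGen.trans _ _ _ hx (hcls _ hold))
          (Relation.EqvGen.symm _ _ (hcls _ hnew))
    · intro x y hx0 hx1 hy0 hy1 hxy
      exact hmono x y hx0 (by omega) hy0 (by omega) hxy
  · have hzd' : ¬ idx2 grid d.1 d.2 = 0 := hzd
    rw [if_neg hzd']
    exact ⟨⟨hlen, hp, hconn⟩, fun x y _ _ _ _ h => h, fun h => absurd h hzd⟩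

theorem cellStep_all {N M : Int} {grid : List (List Int)} (hN : 0 < N) (hM : 0 < M)
    {p : List Int} (hI : IstD N M grid p) {c : Int × Int} (hc : inR N M c) :
    IstD N M grid (cellStep N M grid p c) ∧
    (∀ x y : Int, 0 ≤ x → x < N * M → 0 ≤ y → y < N * M →
      RootP p x = RootP p y →
      RootP (cellStep N M grid p c) x = RootP (cellStep N M grid p c) y) ∧
    QD N M grid c (cellStep N M grid p c) := by
  by_cases hzc : idx2 grid c.1 c.2 = 0
  · have hd1 : (c.1, PySem.Int.mod (c.2 + 1) M) ∈ edgeTargets N M c := List.mem_cons_self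
    have hd2 : (PySem.Int.mod (c.1 + 1) N, c.2) ∈ edgeTargets N M c :=
      List.mem_cons_of_mem _ List.mem_cons_self
    have hin1 : inR N M (c.1, PySem.Int.mod (c.2 + 1) M) := edgeTargets_inR hN hM hc hd1
    have hin2 : inR N M (PySem.Int.mod (c.1 + 1) N, c.2) := edgeTargets_inR hN hM hc hd2
    have hnb1 := edgeTargets_nbr hd1
    have hnb2 := edgeTargets_nbr hd2
    have hcell : cellStep N M grid p c =
        (if idx2 grid (PySem.Int.mod (c.1 + 1) N) c.2 = 0 then
          unionE (if idx2 grid c.1 (PySem.Int.mod (c.2 + 1) M) = 0 then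
                    unionE p (idxM M c) (idxM M (c.1, PySem.Int.mod (c.2 + 1) M)) else p)
            (idxM M c) (idxM M (PySem.Int.mod (c.1 + 1) N, c.2))
         else (if idx2 grid c.1 (PySem.Int.mod (c.2 + 1) M) = 0 then
                    unionE p (idxM M c) (idxM M (c.1, PySem.Int.mod (c.2 + 1) M)) else p)) := by
      simp only [cellStep, if_pos hzc, List.foldl_cons, List.foldl_nil, idxM]
    obtain ⟨hI1, hmono1, hest1⟩ := ustep_all hN hM hI hc hzc hin1 hnb1
    obtain ⟨hI2, hmono2, hest2⟩ := ustep_all hN hM hI1 hc hzc hin2 hnb2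
    rw [hcell]
    refine ⟨hI2, fun x y hx0 hx1 hy0 hy1 h => hmono2 x y hx0 hx1 hy0 hy1
      (hmono1 x y hx0 hx1 hy0 hy1 h), ?_⟩
    intro hgood d hd hzd
    have hu := idxM_range hM hc
    rcases List.mem_cons.1 hd with h | h
    · subst h
      have hv := idxM_range hM hin1
      exact hmono2 _ _ hu.1 hu.2 hv.1 hv.2 (hest1 hzd)
    · rcases List.mem_cons.1 h with h | h
      · subst h
        exact hest2 hzd
      · exact absurd h (List.not_mem_nil)
  · have hcell : cellStep N M grid p c = p := by
      simp only [cellStep, if_neg hzc]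
    rw [hcell]
    exact ⟨hI, fun x y _ _ _ _ h => h, fun hgood => absurd hgood.2 hzc⟩

theorem unionFold_all {N M : Int} {grid : List (List Int)} (hN : 0 < N) (hM : 0 < M)
    (cells : List (Int × Int)) (hcells : ∀ c ∈ cells, inR N M c)
    {p0 : List Int} (hI : IstD N M grid p0) :
    IstD N M grid (cells.foldl (cellStep N M grid) p0) ∧
    ∀ c ∈ cells, QD N M grid c (cells.foldl (cellStep N M grid) p0) := by
  have h := foldl_inv_establish (cellStep N M grid) (IstD N M grid) (QD N M grid) cells
    (fun s a ha hs => (cellStep_all hN hM hs (hcells a ha)).1)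
    (fun s a b hb hs hq => by
      intro hga d hd hzd
      have hin : inR N M d := edgeTargets_inR hN hM hga.1 hd
      have hu := idxM_range hM hga.1
      have hv := idxM_range hM hin
      exact (cellStep_all hN hM hs (hcells b hb)).2.1 _ _ hu.1 hu.2 hv.1 hv.2 (hq hga d hd hzd))
    (fun s a ha hs => (cellStep_all hN hM hs (hcells a ha)).2.2)
    p0 hI
  exact ⟨h.1, h.2.1⟩

-- ===== counting: the scan counts classes, the roots count classes =====

theorem absScan_count {N M : Int} {grid : List (List Int)} (hN : 0 < N) (hM : 0 < M)
    (g : Int × Int → Int × Int)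
    (hker : ∀ c d : Int × Int, inR N M c → inR N M d →
      (g c = g d ↔ Relation.EqvGen (Adj N M grid) c d)) :
    ∀ (cs : List (Int × Int)) (seen : List (Int × Int)) (n : Int),
    (∀ c ∈ cs, inR N M c) → (∀ t ∈ seen, goodC N M grid t) →
    absScan N M grid cs {x | ∃ t ∈ seen, Relation.EqvGen (Adj N M grid) t x} n =
      n + (((((cs.filter (fun c => decide (idx2 grid c.1 c.2 = 0))).map g).toFinset) \
            ((seen.map g).toFinset)).card : Int) := by
  intro cs
  induction cs with
  | nil =>
    intro seen n _ _
    simp [absScan]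
  | cons c cs ih =>
    intro seen n hcs hseen
    have hcin : inR N M c := hcs c List.mem_cons_self
    have hcs' : ∀ d ∈ cs, inR N M d := fun d hd => hcs d (List.mem_cons_of_mem _ hd)
    by_cases hz : idx2 grid c.1 c.2 = 0
    · by_cases hV : c ∈ {x | ∃ t ∈ seen, Relation.EqvGen (Adj N M grid) t x}
      · rw [absScan_cons_neg (fun hcon => hcon.1 hV)]
        rw [ih seen n hcs' hseen]
        obtain ⟨t, ht, hteq⟩ := hV
        have hgc : g c ∈ (seen.map g).toFinset := by
          rw [List.mem_toFinset, List.mem_map]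
          exact ⟨t, ht, (hker t c (hseen t ht).1 hcin).2 hteq⟩
        rw [List.filter_cons_of_pos (by simp [hz]), List.map_cons, List.toFinset_cons,
            Finset.insert_sdiff_of_mem _ hgc]
      · rw [absScan_cons_pos ⟨hV, hz⟩]
        have hgood : goodC N M grid c := ⟨hcin, hz⟩
        have hVeq : {x | x ∈ {x | ∃ t ∈ seen, Relation.EqvGen (Adj N M grid) t x} ∨
            Reach N M grid c x} =
            {x | ∃ t ∈ c :: seen, Relation.EqvGen (Adj N M grid) t x} := by
          ext x
          simp only [Set.mem_setOf_eq, List.mem_cons]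
          constructor
          · rintro (⟨t, ht, hteq⟩ | hr)
            · exact ⟨t, Or.inr ht, hteq⟩
            · exact ⟨c, Or.inl rfl, (reach_iff_eqv hN hM hgood).1 hr⟩
          · rintro ⟨t, ht | ht, hteq⟩
            · subst ht
              exact Or.inr ((reach_iff_eqv hN hM hgood).2 hteq)
            · exact Or.inl ⟨t, ht, hteq⟩
        rw [hVeq, ih (c :: seen) (n + 1) hcs'
          (fun t ht => by
            rcases List.mem_cons.1 ht with h | h
            · exact h ▸ hgood
            · exact hseen t h)]
        have hgcn : g c ∉ (seen.map g).toFinset := by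
          rw [List.mem_toFinset, List.mem_map]
          rintro ⟨t, ht, hteq⟩
          exact hV ⟨t, ht, (hker t c (hseen t ht).1 hcin).1 hteq⟩
        rw [List.filter_cons_of_pos (by simp [hz]), List.map_cons, List.toFinset_cons,
            List.map_cons, List.toFinset_cons]
        have hset : insert (g c) ((cs.filter (fun c => decide (idx2 grid c.1 c.2 = 0))).map
              g).toFinset \ (seen.map g).toFinset =
            insert (g c) (((cs.filter (fun c => decide (idx2 grid c.1 c.2 = 0))).map
              g).toFinset \ insert (g c) ((seen.map g).toFinset)) := by
          ext a
          simp only [Finset.mem_sdiff, Finset.mem_insert]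
          by_cases ha : a = g c
          · subst ha
            simp [hgcn]
          · simp [ha]
        rw [hset, Finset.card_insert_of_notMem (by simp)]
        push_cast
        ring
    · rw [absScan_cons_neg (fun hcon => hz hcon.2)]
      rw [List.filter_cons_of_neg (by simp [hz])]
      exact ih seen n hcs' hseen

-- ===== main theorem =====

theorem bfs_eq_alt (N M : Int) (grid : List (List Int)) : bfs N M grid = bfs_alt N M grid := by
  by_cases hN : 0 < N
  · by_cases hM : 0 < M
    · have hbridge : ∀ {σ : Type} (F : σ → (Int × Int) → σ) (init : σ),
          (PySem.List.pyRange 0 N 1).foldl (fun s i =>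
            (PySem.List.pyRange 0 M 1).foldl (fun s j => F s (i, j)) s) init =
          ((PySem.List.pyRange 0 N 1).flatMap
            (fun i => (PySem.List.pyRange 0 M 1).map (fun j => (i, j)))).foldl F init := by
        intro σ F init
        rw [List.foldl_flatMap]
        congr 1
        funext s i
        rw [List.foldl_map]
      set cells := (PySem.List.pyRange 0 N 1).flatMap
          (fun i => (PySem.List.pyRange 0 M 1).map (fun j => (i, j))) with hcellsdef
      have hcells : ∀ c ∈ cells, inR N M c := by
        intro c hc
        rw [hcellsdef] at hc
        simp only [List.mem_flatMap, List.mem_map] at hc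
        obtain ⟨i, hi, j, hj, rfl⟩ := hc
        rw [PySem.List.mem_pyRange_one] at hi hj
        exact ⟨hi.1, hi.2, hj.1, hj.2⟩
      have hcomplete : ∀ c : Int × Int, inR N M c → c ∈ cells := by
        intro c hc
        rw [hcellsdef]
        simp only [List.mem_flatMap, List.mem_map]
        refine ⟨c.1, ?_, c.2, ?_, rfl⟩
        · rw [PySem.List.mem_pyRange_one]; exact ⟨hc.1, hc.2.1⟩
        · rw [PySem.List.mem_pyRange_one]; exact ⟨hc.2.2.1, hc.2.2.2⟩
      have hnodup : cells.Nodup := by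
        rw [hcellsdef, List.nodup_flatMap]
        constructor
        · intro i _
          exact (PySem.List.nodup_pyRange_one 0 M).map
            (fun a b hab => by simpa using congrArg Prod.snd hab)
        · have := PySem.List.pairwise_lt_pyRange_one 0 N
          refine this.imp ?_
          intro a b hab x hxa hxb
          simp only [List.mem_map] at hxa hxb
          obtain ⟨j1, _, rfl⟩ := hxa
          obtain ⟨j2, _, he⟩ := hxb
          have := congrArg Prod.fst he
          simp at this
          omega
      -- the initial parent array
      set p0 := PySem.List.pyRange 0 (max N 0 * max M 0) 1 with hp0def
      have hNM : 0 < N * M := mul_pos hN hM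
      have hlen0 : (p0.length : Int) = N * M := by
        rw [hp0def, PySem.List.length_pyRange_one]
        rw [max_eq_left (le_of_lt hN), max_eq_left (le_of_lt hM)]
        omega
      have hget0 : ∀ x : Int, 0 ≤ x → x < N * M → PySem.List.pyGetD p0 x 0 = x := by
        intro x h0 h1
        rw [PySem.List.pyGetD_eq_getElem _ _ h0 (by omega)]
        simp only [hp0def, PySem.List.getElem_pyRange_one]
        omega
      have hPinv0 : Pinv p0 := by
        intro x h0 h1
        rw [hget0 x h0 (by omega)]
        exact ⟨h0, le_rfl⟩
      have hI0 : IstD N M grid p0 := by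
        refine ⟨hlen0, hPinv0, ?_⟩
        intro x h0 h1
        rw [rootP_fix hPinv0 h0 h1 (hget0 x h0 (by omega))]
        exact Relation.EqvGen.refl _
      set pF := cells.foldl (cellStep N M grid) p0 with hpFdef
      obtain ⟨hIF, hQall⟩ := unionFold_all hN hM cells hcells hI0
      have hlenF : (pF.length : Int) = N * M := hIF.1
      have hPinvF : Pinv pF := hIF.2.1
      have hConnF : ConnP N M grid pF := hIF.2.2
      have hre : ∀ c d : Int × Int, Relation.EqvGen (Adj N M grid) c d →
          RootP pF (idxM M c) = RootP pF (idxM M d) := by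
        intro c d h
        induction h with
        | rel a b hab =>
          rcases adj_cover hN hM hab.1.1 hab.2.2 with hcov | hcov
          · exact hQall a (hcomplete a hab.1.1) hab.1 b hcov hab.2.1.2
          · exact (hQall b (hcomplete b hab.2.1.1) hab.2.1 a hcov hab.1.2).symm
        | refl a => rfl
        | symm a b _ ih => exact ih.symm
        | trans a b c _ _ ih1 ih2 => exact ih1.trans ih2
      set g := fun c : Int × Int => unidxM M (RootP pF (idxM M c)) with hgdef
      have hconn' : ∀ c : Int × Int, inR N M c →
          Relation.EqvGen (Adj N M grid) c (g c) := by
        intro c hcin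
        have hb := idxM_range hM hcin
        have h := hConnF (idxM M c) hb.1 (by omega)
        rwa [unidxM_idxM hM hcin.2.2.1 hcin.2.2.2] at h
      have hker : ∀ c d : Int × Int, inR N M c → inR N M d →
          (g c = g d ↔ Relation.EqvGen (Adj N M grid) c d) := by
        intro c d hcin hdin
        constructor
        · intro hgcd
          exact Relation.EqvGen.trans _ _ _ (hconn' c hcin)
            (hgcd ▸ Relation.EqvGen.symm _ _ (hconn' d hdin))
        · intro h
          rw [hgdef]
          simp only
          rw [hre c d h]
      -- A's value: the class count
      have hA : bfs N M grid = absScan N M grid cells ∅ 0 := by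
        unfold bfs
        rw [hbridge (fun (s : List (List Int) × Int) (c : Int × Int) =>
              if idx2 s.1 c.1 c.2 = 0 ∧ idx2 grid c.1 c.2 = 0 then
                (loopA N M grid (N.toNat * M.toNat) (vset s.1 c.1 c.2) [c], s.2 + 1)
              else s) (List.replicate N.toNat (List.replicate M.toNat 0), 0)]
        exact outerA hN hM cells (List.replicate N.toNat (List.replicate M.toNat 0)) ∅ 0
          hcells (relA_init N M) ⟨List.nodup_nil, by simp, by simp [Good], by simp⟩
      have hemp : (∅ : Set (Int × Int)) =
          {x | ∃ t ∈ ([] : List (Int × Int)), Relation.EqvGen (Adj N M grid) t x} := by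
        ext x; simp
      have hAc : bfs N M grid =
          ((((cells.filter (fun c => decide (idx2 grid c.1 c.2 = 0))).map g).toFinset.card : Nat) : Int) := by
        rw [hA, hemp, absScan_count hN hM g hker cells [] 0 hcells (by simp)]
        simp
      -- B's value: the root count
      have hBfold : (PySem.List.pyRange 0 N 1).foldl (fun par i =>
          (PySem.List.pyRange 0 M 1).foldl (fun par j => cellStep N M grid par (i, j)) par) p0
          = pF := by
        rw [hpFdef]
        exact hbridge (cellStep N M grid) p0
      have hB1 : bfs_alt N M grid = (PySem.List.pyRange 0 N 1).foldl (fun (acc : Int) i =>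
          (PySem.List.pyRange 0 M 1).foldl (fun (acc : Int) j =>
            if idx2 grid i j = 0 ∧ findP pF pF.length (i * M + j) = i * M + j then acc + 1
            else acc) acc) 0 := by
        rw [← hBfold]
        rfl
      have hpb : ∀ c : Int × Int,
          (idx2 grid c.1 c.2 = 0 ∧ findP pF pF.length (c.1 * M + c.2) = c.1 * M + c.2) ↔
          (idx2 grid c.1 c.2 = 0 ∧ RootP pF (idxM M c) = idxM M c) := by
        intro c
        exact Iff.rfl
      have hB2 : bfs_alt N M grid = ((cells.countP (fun c =>
          decide (idx2 grid c.1 c.2 = 0 ∧ RootP pF (idxM M c) = idxM M c)) : Nat) : Int) := by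
        rw [hB1, hbridge (fun (acc : Int) (c : Int × Int) =>
          if idx2 grid c.1 c.2 = 0 ∧ findP pF pF.length (c.1 * M + c.2) = c.1 * M + c.2 then
            acc + 1 else acc) 0]
        have hfun : (fun (acc : Int) (c : Int × Int) =>
            if idx2 grid c.1 c.2 = 0 ∧ findP pF pF.length (c.1 * M + c.2) = c.1 * M + c.2 then
              acc + 1 else acc) =
            (fun (acc : Int) (c : Int × Int) =>
              if (fun c : Int × Int =>
                decide (idx2 grid c.1 c.2 = 0 ∧ RootP pF (idxM M c) = idxM M c)) c = true then
                acc + 1 else acc) := by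
          funext acc c
          by_cases h : idx2 grid c.1 c.2 = 0 ∧ RootP pF (idxM M c) = idxM M c
          · rw [if_pos ((hpb c).2 h), if_pos (by simpa using h)]
          · rw [if_neg (fun hc => h ((hpb c).1 hc)), if_neg (by simpa using h)]
        rw [hfun, PySem.List.foldl_count_if]
        simp
      -- the two counts agree
      have hfs : (cells.filter (fun c =>
            decide (idx2 grid c.1 c.2 = 0 ∧ RootP pF (idxM M c) = idxM M c))).toFinset =
          ((cells.filter (fun c => decide (idx2 grid c.1 c.2 = 0))).map g).toFinset := by
        ext x
        simp only [List.mem_toFinset, List.mem_filter, List.mem_map, decide_eq_true_eq]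
        constructor
        · rintro ⟨hx, hzx, hrx⟩
          have hxin := hcells x hx
          refine ⟨x, ⟨hx, by simpa using hzx⟩, ?_⟩
          rw [hgdef]
          simp only
          rw [hrx, unidxM_idxM hM hxin.2.2.1 hxin.2.2.2]
        · rintro ⟨c, ⟨hc, hzc⟩, hgc⟩
          have hzc' : idx2 grid c.1 c.2 = 0 := by simpa using hzc
          have hcin := hcells c hc
          have hb := idxM_range hM hcin
          obtain ⟨hr0, hrle, hrfix⟩ := rootP_spec hPinvF hb.1 (by omega)
          have hrn : RootP pF (idxM M c) < N * M := by omega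
          have hgcval : g c = unidxM M (RootP pF (idxM M c)) := by rw [hgdef]
          have hxin : inR N M x := by
            rw [← hgc, hgcval]
            exact unidxM_inR hM hr0 hrn
          have hxid : idxM M x = RootP pF (idxM M c) := by
            rw [← hgc, hgcval]
            exact idxM_unidxM hM
          refine ⟨hcomplete x hxin, ?_, ?_⟩
          · have hEq : Relation.EqvGen (Adj N M grid) c x := by
              rw [← hgc]; exact hconn' c hcin
            rcases eqv_good hEq with he | ⟨_, hgx⟩
            · rw [← he]; exact hzc'
            · exact hgx.2
          · rw [hxid]
            exact rootP_fix hPinvF hr0 (by omega) hrfix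
      have hcard : (cells.filter (fun c =>
            decide (idx2 grid c.1 c.2 = 0 ∧ RootP pF (idxM M c) = idxM M c))).length =
          ((cells.filter (fun c => decide (idx2 grid c.1 c.2 = 0))).map g).toFinset.card := by
        rw [← hfs, List.toFinset_card_of_nodup (hnodup.filter _)]
      rw [hAc, hB2, List.countP_eq_length_filter, hcard]
    · have hM' : M ≤ 0 := not_lt.1 hM
      unfold bfs bfs_alt
      rw [PySem.List.pyRange_one_eq_nil hM']
      simp
  · have hN' : N ≤ 0 := not_lt.1 hN
    unfold bfs bfs_alt
    rw [PySem.List.pyRange_one_eq_nil hN']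
    simp

-- ===== VERDICT (by name: the statement is the Claim_ definition above) =====
theorem bfs_spec : Claim_equal_bfs := by
  intro N M grid _ _
  unfold Spec_bfs
  exact bfs_eq_alt N M grid
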